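-- pv_equiv track=rewrite | github.com/Ashiq-am/Path-of-Python | 3.Data Types/Arrays Set 1 and Set 2/Prefix Sum/Count quadruples of given type from given array/2.Count quadruples of given type from given array.py | countSubsequece
-- ===== SOURCE A (Python) =====
-- def countSubsequece(a, n):
--     # Stores the count
--     # of quadruples
--     answer = 0
--
--     # Generate all possible
--     # combinations of quadruples
--     for i in range(n):
--         for j in range(i + 1, n):
--             for k in range(j + 1, n):
--                 for l in range(k + 1, n):
--
--                     # Check if 1st element is
--                     # equal to 3rd element
--                     if (a[j] == a[l] and
--
--                             # Check if 2nd element is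
--                             # equal to 4th element
--                             a[i] == a[k]):
--                         answer += 1
--
--     return answer
-- ===== SOURCE B (Python) =====
-- def countSubsequece(a, n):
--     # For each middle pair (j, k), the quadruples with that middle pair number
--     # (count of i < j with a[i] == a[k]) * (count of l > k with a[l] == a[j]).
--     # Maintain those counts in dictionaries: `left` counts a[0:j]; for each j,
--     # `right` starts as the counts of a[j+1:n] and a[k] is removed from it as k
--     # advances, so inside the k-loop it holds the counts of a[k+1:n].
--     answer = 0
--     left = {}
--     for j in range(n):
--         right = {}
--         for l in range(j + 1, n):
--             right[a[l]] = right.get(a[l], 0) + 1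
--         for k in range(j + 1, n):
--             right[a[k]] = right.get(a[k], 0) - 1
--             answer += left.get(a[k], 0) * right.get(a[j], 0)
--         left[a[j]] = left.get(a[j], 0) + 1
--     return answer
-- ===== Notes on version B (the rewrite author's own statement) =====
-- stated objective: faster
-- what changed: Replaced A's four nested index loops (enumerating every quadruple i<j<k<l) by a double loop over the middle pair (j,k) that multiplies dictionary-maintained counts: the number of i<j with a[i]==a[k] (prefix counter) times the number of l>k with a[l]==a[j] (suffix counter).
-- outside the precondition, e.g. on countSubsequece([], 1): A returns 0, B raises IndexError; on countSubsequece([5], 3): A returns 0, B raises IndexError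
import Mathlib
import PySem

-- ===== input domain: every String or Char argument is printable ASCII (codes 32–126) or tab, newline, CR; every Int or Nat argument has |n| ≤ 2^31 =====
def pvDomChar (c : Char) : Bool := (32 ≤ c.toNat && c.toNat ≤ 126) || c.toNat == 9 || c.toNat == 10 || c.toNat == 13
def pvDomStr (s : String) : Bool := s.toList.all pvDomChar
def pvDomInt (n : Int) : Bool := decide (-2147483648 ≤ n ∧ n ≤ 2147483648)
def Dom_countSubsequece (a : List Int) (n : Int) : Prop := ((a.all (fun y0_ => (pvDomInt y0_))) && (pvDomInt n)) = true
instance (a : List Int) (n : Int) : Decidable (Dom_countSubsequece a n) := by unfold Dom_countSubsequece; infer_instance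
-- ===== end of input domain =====

-- B replaces A's four nested index loops by a loop over the middle pair (j, k) that multiplies
-- the dictionary-maintained count of matching i < j by the count of matching l > k
-- (objective: faster, O(n^2) vs O(n^4)).

-- ===== PORT A =====
def countSubsequece (a : List Int) (n : Int) : Int :=
  (PySem.List.pyRange 0 n 1).foldl (fun answer i =>
    (PySem.List.pyRange (i + 1) n 1).foldl (fun answer j =>
      (PySem.List.pyRange (j + 1) n 1).foldl (fun answer k =>
        (PySem.List.pyRange (k + 1) n 1).foldl (fun answer l =>
          if PySem.List.pyGetD a j 0 = PySem.List.pyGetD a l 0 ∧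
             PySem.List.pyGetD a i 0 = PySem.List.pyGetD a k 0 then answer + 1
          else answer) answer) answer) answer) 0

-- ===== PORT B =====
def countSubsequece_alt (a : List Int) (n : Int) : Int :=
  ((PySem.List.pyRange 0 n 1).foldl (fun (st : Int × PySem.Dict Int Int) j =>
      let right := (PySem.List.pyRange (j + 1) n 1).foldl
        (fun d l => d.insert (PySem.List.pyGetD a l 0) (d.getD (PySem.List.pyGetD a l 0) 0 + 1))
        PySem.Dict.empty
      let inner := (PySem.List.pyRange (j + 1) n 1).foldl
        (fun (st2 : Int × PySem.Dict Int Int) k =>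
          let r := st2.2.insert (PySem.List.pyGetD a k 0) (st2.2.getD (PySem.List.pyGetD a k 0) 0 - 1)
          (st2.1 + st.2.getD (PySem.List.pyGetD a k 0) 0 * r.getD (PySem.List.pyGetD a j 0) 0, r))
        (st.1, right)
      (inner.1, st.2.insert (PySem.List.pyGetD a j 0) (st.2.getD (PySem.List.pyGetD a j 0) 0 + 1)))
    (0, PySem.Dict.empty)).1

-- ===== PRECONDITION & SPEC =====
-- Pre_ excludes n > len(a) with n ≥ 1: there Python A raises IndexError for n ≥ 4 and returns 0
-- for n ∈ {1, 2, 3} (its quadruple loop body is never reached), while B reads a[j] for every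
-- j < n and itself raises IndexError.
def Pre_countSubsequece (a : List Int) (n : Int) : Prop := n ≤ (a.length : Int) ∨ n ≤ 0
instance (a : List Int) (n : Int) : Decidable (Pre_countSubsequece a n) := by unfold Pre_countSubsequece; infer_instance
def pvWitness_countSubsequece : List Int × Int := ([1, 2, 1, 2], 4)

def Spec_countSubsequece (a : List Int) (n : Int) (out : Int) : Prop := out = countSubsequece_alt a n
instance (a : List Int) (n : Int) (out : Int) : Decidable (Spec_countSubsequece a n out) := by unfold Spec_countSubsequece; infer_instance

-- ===== CLAIM (what is proved, stated in full; the proofs are below) =====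
def Claim_equal_countSubsequece : Prop := ∀ (a : List Int) (n : Int), Dom_countSubsequece a n → Pre_countSubsequece a n → Spec_countSubsequece a n (countSubsequece a n)

-- ===== LEMMAS AND PROOFS =====

-- sum of f over range(a, b) as a Finset sum
lemma pvSumPy (f : ℤ → ℤ) (a b : ℤ) :
    ((PySem.List.pyRange a b 1).map f).sum = ∑ x ∈ Finset.Ico a b, f x := by
  generalize hm : (b - a).toNat = m
  induction m generalizing a with
  | zero =>
    rw [PySem.List.pyRange_one_eq_nil (by omega), Finset.Ico_eq_empty (by omega)]
    simp
  | succ m ih =>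
    have hab : a < b := by omega
    have hins : insert a (Finset.Ico (a + 1) b) = Finset.Ico a b := by
      simpa using Finset.insert_Ico_succ_left_eq_Ico (a := a) (b := b) hab
    rw [PySem.List.pyRange_one_cons hab, ← hins, Finset.sum_insert (by simp)]
    simp [ih (a + 1) (by omega)]

-- countP over range(a, b) as a Finset sum of 0/1 indicators
lemma pvCountPy (p : ℤ → Prop) [DecidablePred p] (a b : ℤ) :
    (((PySem.List.pyRange a b 1).countP (fun x => decide (p x)) : ℕ) : ℤ)
      = ∑ x ∈ Finset.Ico a b, (if p x then (1 : ℤ) else 0) := by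
  rw [← pvSumPy, ← PySem.List.sum_map_ite_one_zero]
  simp only [decide_eq_true_eq]

-- triangle reindexing  Σ_{0 ≤ i < j < n} = Σ_{0 ≤ j < n} Σ_{0 ≤ i < j}  over ℤ
lemma pvSwap (n : ℤ) (F : ℤ → ℤ → ℤ) :
    (∑ i ∈ Finset.Ico 0 n, ∑ j ∈ Finset.Ico (i + 1) n, F i j)
      = ∑ j ∈ Finset.Ico 0 n, ∑ i ∈ Finset.Ico 0 j, F i j := by
  rw [Finset.sum_sigma', Finset.sum_sigma']
  refine Finset.sum_nbij' (fun x => ⟨x.2, x.1⟩) (fun x => ⟨x.2, x.1⟩) ?_ ?_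
      (fun _ _ => rfl) (fun _ _ => rfl) (fun _ _ => rfl) <;>
    simp only [Finset.mem_Ico, Sigma.forall, Finset.mem_sigma] <;> omega

lemma pvA_sum (a : List Int) (n : Int) :
    countSubsequece a n
      = ∑ i ∈ Finset.Ico 0 n, ∑ j ∈ Finset.Ico (i + 1) n, ∑ k ∈ Finset.Ico (j + 1) n,
          ∑ l ∈ Finset.Ico (k + 1) n,
            (if PySem.List.pyGetD a j 0 = PySem.List.pyGetD a l 0 ∧
                PySem.List.pyGetD a i 0 = PySem.List.pyGetD a k 0 then (1 : ℤ) else 0) := by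
  unfold countSubsequece
  simp only [PySem.List.foldl_ite_add_one, PySem.List.foldl_add, pvCountPy, pvSumPy, zero_add]

-- the counting loop 'right[a[l]] = right.get(a[l], 0) + 1' over range(m, n)
lemma pvCntLoop (a : List Int) (n m : ℤ) (d : PySem.Dict Int Int) (v : ℤ) :
    ((PySem.List.pyRange m n 1).foldl
        (fun d l => d.insert (PySem.List.pyGetD a l 0) (d.getD (PySem.List.pyGetD a l 0) 0 + 1))
        d).getD v 0
      = d.getD v 0 + ∑ l ∈ Finset.Ico m n,
          (if PySem.List.pyGetD a l 0 = v then (1 : ℤ) else 0) := by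
  generalize hm : (n - m).toNat = t
  induction t generalizing m d with
  | zero =>
    rw [PySem.List.pyRange_one_eq_nil (by omega), Finset.Ico_eq_empty (by omega)]
    simp
  | succ t ih =>
    have hmn : m < n := by omega
    have hins : insert m (Finset.Ico (m + 1) n) = Finset.Ico m n := by
      simpa using Finset.insert_Ico_succ_left_eq_Ico (a := m) (b := n) hmn
    rw [PySem.List.pyRange_one_cons hmn, List.foldl_cons, ← hins, Finset.sum_insert (by simp),
      ih (m + 1) _ (by omega), PySem.Dict.getD_insert]
    by_cases hv : v = PySem.List.pyGetD a m 0 <;> simp [hv, eq_comm] <;> ring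

-- the inner k-loop: decrement right at a[k], then add left[a[k]] * right[a[j]]
lemma pvInnerLoop (a : List Int) (n j m c : ℤ) (L R : PySem.Dict Int Int)
    (hR : ∀ v, R.getD v 0 = ∑ l ∈ Finset.Ico m n,
        (if PySem.List.pyGetD a l 0 = v then (1 : ℤ) else 0)) :
    ((PySem.List.pyRange m n 1).foldl
        (fun (st2 : Int × PySem.Dict Int Int) k =>
          let r := st2.2.insert (PySem.List.pyGetD a k 0) (st2.2.getD (PySem.List.pyGetD a k 0) 0 - 1)
          (st2.1 + L.getD (PySem.List.pyGetD a k 0) 0 * r.getD (PySem.List.pyGetD a j 0) 0, r))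
        (c, R)).1
      = c + ∑ k ∈ Finset.Ico m n, L.getD (PySem.List.pyGetD a k 0) 0 *
          ∑ l ∈ Finset.Ico (k + 1) n,
            (if PySem.List.pyGetD a l 0 = PySem.List.pyGetD a j 0 then (1 : ℤ) else 0) := by
  generalize hm : (n - m).toNat = t
  induction t generalizing m c R with
  | zero =>
    rw [PySem.List.pyRange_one_eq_nil (by omega), Finset.Ico_eq_empty (by omega)]
    simp
  | succ t ih =>
    have hmn : m < n := by omega
    have hins : insert m (Finset.Ico (m + 1) n) = Finset.Ico m n := by
      simpa using Finset.insert_Ico_succ_left_eq_Ico (a := m) (b := n) hmn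
    have hR' : ∀ v, (R.insert (PySem.List.pyGetD a m 0)
        (R.getD (PySem.List.pyGetD a m 0) 0 - 1)).getD v 0
        = ∑ l ∈ Finset.Ico (m + 1) n, (if PySem.List.pyGetD a l 0 = v then (1 : ℤ) else 0) := by
      intro v
      rw [PySem.Dict.getD_insert]
      have hsum : ∀ u, (∑ l ∈ Finset.Ico m n, (if PySem.List.pyGetD a l 0 = u then (1 : ℤ) else 0))
          = (if PySem.List.pyGetD a m 0 = u then (1 : ℤ) else 0)
            + ∑ l ∈ Finset.Ico (m + 1) n, (if PySem.List.pyGetD a l 0 = u then (1 : ℤ) else 0) := by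
        intro u; rw [← hins, Finset.sum_insert (by simp)]
      by_cases hv : v = PySem.List.pyGetD a m 0
      · subst hv; rw [if_pos rfl, hR, hsum, if_pos rfl]; ring
      · rw [if_neg hv, hR, hsum, if_neg (fun h => hv h.symm), zero_add]
    rw [PySem.List.pyRange_one_cons hmn, List.foldl_cons, ← hins, Finset.sum_insert (by simp)]
    simp only []
    rw [ih (m + 1) _ _ hR' (by omega), hR' (PySem.List.pyGetD a j 0)]
    ring

-- the outer j-loop: its state is (answer, left), left counting a[0:j]
lemma pvOuterLoop (a : List Int) (n m c : ℤ) (L : PySem.Dict Int Int) (hm : 0 ≤ m)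
    (hL : ∀ v, L.getD v 0 = ∑ i ∈ Finset.Ico 0 m,
        (if PySem.List.pyGetD a i 0 = v then (1 : ℤ) else 0)) :
    ((PySem.List.pyRange m n 1).foldl (fun (st : Int × PySem.Dict Int Int) j =>
        let right := (PySem.List.pyRange (j + 1) n 1).foldl
          (fun d l => d.insert (PySem.List.pyGetD a l 0) (d.getD (PySem.List.pyGetD a l 0) 0 + 1))
          PySem.Dict.empty
        let inner := (PySem.List.pyRange (j + 1) n 1).foldl
          (fun (st2 : Int × PySem.Dict Int Int) k =>
            let r := st2.2.insert (PySem.List.pyGetD a k 0) (st2.2.getD (PySem.List.pyGetD a k 0) 0 - 1)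
            (st2.1 + st.2.getD (PySem.List.pyGetD a k 0) 0 * r.getD (PySem.List.pyGetD a j 0) 0, r))
          (st.1, right)
        (inner.1, st.2.insert (PySem.List.pyGetD a j 0) (st.2.getD (PySem.List.pyGetD a j 0) 0 + 1)))
      (c, L)).1
      = c + ∑ j ∈ Finset.Ico m n, ∑ k ∈ Finset.Ico (j + 1) n,
          (∑ i ∈ Finset.Ico 0 j,
            (if PySem.List.pyGetD a i 0 = PySem.List.pyGetD a k 0 then (1 : ℤ) else 0)) *
          (∑ l ∈ Finset.Ico (k + 1) n,
            (if PySem.List.pyGetD a l 0 = PySem.List.pyGetD a j 0 then (1 : ℤ) else 0)) := by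
  generalize hmt : (n - m).toNat = t
  induction t generalizing m c L with
  | zero =>
    rw [PySem.List.pyRange_one_eq_nil (by omega), Finset.Ico_eq_empty (by omega)]
    simp
  | succ t ih =>
    have hmn : m < n := by omega
    have hins : insert m (Finset.Ico (m + 1) n) = Finset.Ico m n := by
      simpa using Finset.insert_Ico_succ_left_eq_Ico (a := m) (b := n) hmn
    have hL' : ∀ v, (L.insert (PySem.List.pyGetD a m 0)
        (L.getD (PySem.List.pyGetD a m 0) 0 + 1)).getD v 0
        = ∑ i ∈ Finset.Ico 0 (m + 1), (if PySem.List.pyGetD a i 0 = v then (1 : ℤ) else 0) := by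
      intro v
      have hins' : insert m (Finset.Ico 0 m) = Finset.Ico 0 (m + 1) := by
        simpa using Finset.insert_Ico_right_eq_Ico_succ (a := (0 : ℤ)) (b := m) hm
      rw [PySem.Dict.getD_insert, ← hins', Finset.sum_insert (by simp)]
      by_cases hv : v = PySem.List.pyGetD a m 0 <;> simp [hv, hL, eq_comm] <;> ring
    have hR : ∀ v, ((PySem.List.pyRange (m + 1) n 1).foldl
        (fun d l => d.insert (PySem.List.pyGetD a l 0) (d.getD (PySem.List.pyGetD a l 0) 0 + 1))
        PySem.Dict.empty).getD v 0
        = ∑ l ∈ Finset.Ico (m + 1) n, (if PySem.List.pyGetD a l 0 = v then (1 : ℤ) else 0) := by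
      intro v; rw [pvCntLoop]; simp [PySem.Dict.getD_empty]
    rw [PySem.List.pyRange_one_cons hmn, List.foldl_cons, ← hins, Finset.sum_insert (by simp)]
    simp only []
    rw [ih (m + 1) _ _ (by omega) hL' (by omega), pvInnerLoop a n m (m + 1) c L _ hR]
    have hLrw : (∑ k ∈ Finset.Ico (m + 1) n, L.getD (PySem.List.pyGetD a k 0) 0 *
          ∑ l ∈ Finset.Ico (k + 1) n,
            (if PySem.List.pyGetD a l 0 = PySem.List.pyGetD a m 0 then (1 : ℤ) else 0))
        = ∑ k ∈ Finset.Ico (m + 1) n,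
            (∑ i ∈ Finset.Ico 0 m,
              (if PySem.List.pyGetD a i 0 = PySem.List.pyGetD a k 0 then (1 : ℤ) else 0)) *
            (∑ l ∈ Finset.Ico (k + 1) n,
              (if PySem.List.pyGetD a l 0 = PySem.List.pyGetD a m 0 then (1 : ℤ) else 0)) :=
      Finset.sum_congr rfl fun k _ => by rw [hL]
    rw [hLrw]
    ring

lemma pvB_sum (a : List Int) (n : Int) :
    countSubsequece_alt a n
      = ∑ j ∈ Finset.Ico 0 n, ∑ k ∈ Finset.Ico (j + 1) n,
          (∑ i ∈ Finset.Ico 0 j,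
            (if PySem.List.pyGetD a i 0 = PySem.List.pyGetD a k 0 then (1 : ℤ) else 0)) *
          (∑ l ∈ Finset.Ico (k + 1) n,
            (if PySem.List.pyGetD a l 0 = PySem.List.pyGetD a j 0 then (1 : ℤ) else 0)) := by
  unfold countSubsequece_alt
  rw [pvOuterLoop a n 0 0 PySem.Dict.empty le_rfl
    (fun v => by simp [PySem.Dict.getD_empty])]
  ring

lemma pvIndicatorSplit (P Q : Prop) [Decidable P] [Decidable Q] :
    (if P ∧ Q then (1 : ℤ) else 0) = (if Q then (1 : ℤ) else 0) * (if P then (1 : ℤ) else 0) := by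
  by_cases hP : P <;> by_cases hQ : Q <;> simp [hP, hQ]

-- ===== VERDICT (by name: the statement is the Claim_ definition above) =====
theorem countSubsequece_spec : Claim_equal_countSubsequece := by
  intro a n _ _
  unfold Spec_countSubsequece
  rw [pvA_sum, pvB_sum]
  set w : ℤ → ℤ := fun t => PySem.List.pyGetD a t 0 with hw
  calc
    (∑ i ∈ Finset.Ico 0 n, ∑ j ∈ Finset.Ico (i + 1) n, ∑ k ∈ Finset.Ico (j + 1) n,
        ∑ l ∈ Finset.Ico (k + 1) n, (if w j = w l ∧ w i = w k then (1 : ℤ) else 0))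
        = ∑ i ∈ Finset.Ico 0 n, ∑ j ∈ Finset.Ico (i + 1) n, ∑ k ∈ Finset.Ico (j + 1) n,
            (if w i = w k then (1 : ℤ) else 0) *
              ∑ l ∈ Finset.Ico (k + 1) n, (if w l = w j then (1 : ℤ) else 0) := by
        refine Finset.sum_congr rfl fun i _ => Finset.sum_congr rfl fun j _ =>
          Finset.sum_congr rfl fun k _ => ?_
        rw [Finset.mul_sum]
        refine Finset.sum_congr rfl fun l _ => ?_
        rw [← pvIndicatorSplit]
        exact if_congr (and_congr (eq_comm) Iff.rfl) rfl rfl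
    _ = ∑ j ∈ Finset.Ico 0 n, ∑ i ∈ Finset.Ico 0 j, ∑ k ∈ Finset.Ico (j + 1) n,
            (if w i = w k then (1 : ℤ) else 0) *
              ∑ l ∈ Finset.Ico (k + 1) n, (if w l = w j then (1 : ℤ) else 0) :=
        pvSwap n _
    _ = ∑ j ∈ Finset.Ico 0 n, ∑ k ∈ Finset.Ico (j + 1) n,
          (∑ i ∈ Finset.Ico 0 j, (if w i = w k then (1 : ℤ) else 0)) *
          (∑ l ∈ Finset.Ico (k + 1) n, (if w l = w j then (1 : ℤ) else 0)) := by
        refine Finset.sum_congr rfl fun j _ => ?_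
        rw [Finset.sum_comm]
        exact Finset.sum_congr rfl fun k _ => (Finset.sum_mul ..).symm
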